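-- pv_equiv track=rewrite | github.com/ursabastin/coco | core/skill_manager.py | parse_natural_command
-- ===== SOURCE A (Python) =====
-- def parse_natural_command(command):
--     """Parse natural language command into intent and parameters"""
--     command_lower = command.lower()
--
--     # Browser patterns
--     if "open" in command_lower and any(x in command_lower for x in ["website", "site", ".com", "http"]):
--         # Extract URL
--         words = command.split()
--         url = next((w for w in words if '.com' in w or 'http' in w), None)
--         if url:
--             return ("open_website", {"url": url})
--
--     elif "search" in command_lower and "google" in command_lower:
--         # Extract query after "search" or "for"
--         if "for" in command_lower:
--             query = command_lower.split("for", 1)[1].strip()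
--         else:
--             query = command_lower.replace("search", "").replace("google", "").strip()
--         return ("search_google", {"query": query})
--
--     elif "close browser" in command_lower:
--         return ("close_browser", {})
--
--     # System patterns
--     elif "open" in command_lower and any(x in command_lower for x in ["notepad", "calculator", "paint", "chrome", "edge"]):
--         app = next((x for x in ["notepad", "calculator", "paint", "chrome", "edge"] if x in command_lower), None)
--         return ("open_app", {"app": app})
--
--     elif "close" in command_lower:
--         words = command_lower.split()
--         app = words[-1] if words else ""
--         return ("close_app", {"app": app})
--
--     elif "what" in command_lower and "running" in command_lower:
--         return ("list_apps", {})
--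
--     # Keyboard patterns
--     elif "type" in command_lower:
--         text = command.replace("type", "", 1).strip()
--         return ("type_text", {"text": text})
--
--     elif "screenshot" in command_lower:
--         return ("screenshot", {})
--
--     # Screen reading
--     elif "read screen" in command_lower or "what's on screen" in command_lower:
--         return ("read_screen", {})
--
--     # File patterns
--     elif "create file" in command_lower:
--         return ("create_file", {"filepath": "created_file.txt", "content": "Created by coco"})
--
--     elif "list files" in command_lower:
--         return ("list_files", {"folder": "."})
--
--     return (None, {})
-- ===== SOURCE B (Python) =====
-- # Two-stage re-implementation: a declarative keyword grammar (ALL-of / ANY-of lists per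
-- # intent) matched exhaustively, then a separate parameter-extraction stage keyed by intent.
--
-- _SITE_WORDS = ["website", "site", ".com", "http"]
-- _APPS = ["notepad", "calculator", "paint", "chrome", "edge"]
--
-- # each rule: (intent, keywords that must ALL appear, keywords of which ANY must appear)
-- _RULES = [
--     ("open_website", ["open"], _SITE_WORDS),
--     ("search_google", ["search", "google"], []),
--     ("close_browser", ["close browser"], []),
--     ("open_app", ["open"], _APPS),
--     ("close_app", ["close"], []),
--     ("list_apps", ["what", "running"], []),
--     ("type_text", ["type"], []),
--     ("screenshot", ["screenshot"], []),
--     ("read_screen", [], ["read screen", "what's on screen"]),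
--     ("create_file", ["create file"], []),
--     ("list_files", ["list files"], []),
-- ]
--
--
-- def _matches(cl, need_all, need_any):
--     return all(k in cl for k in need_all) and (not need_any or any(k in cl for k in need_any))
--
--
-- def _params_open_website(command, cl):
--     url = next((w for w in command.split() if '.com' in w or 'http' in w), None)
--     return {"url": url} if url is not None else None
--
--
-- def _params_search_google(command, cl):
--     if "for" in cl:
--         query = cl.split("for", 1)[1].strip()
--     else:
--         query = cl.replace("search", "").replace("google", "").strip()
--     return {"query": query}
--
--
-- def _params_open_app(command, cl):
--     return {"app": next(x for x in _APPS if x in cl)}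
--
--
-- def _params_close_app(command, cl):
--     words = cl.split()
--     return {"app": words[-1] if words else ""}
--
--
-- def _params_type_text(command, cl):
--     return {"text": command.replace("type", "", 1).strip()}
--
--
-- _EXTRACTORS = {
--     "open_website": _params_open_website,
--     "search_google": _params_search_google,
--     "open_app": _params_open_app,
--     "close_app": _params_close_app,
--     "type_text": _params_type_text,
--     "create_file": lambda c, cl: {"filepath": "created_file.txt", "content": "Created by coco"},
--     "list_files": lambda c, cl: {"folder": "."},
-- }
--
--
-- def parse_natural_command(command):
--     """Parse natural language command into intent and parameters"""
--     cl = command.lower()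
--     hits = [intent for intent, na, ny in _RULES if _matches(cl, na, ny)]
--     if not hits:
--         return (None, {})
--     intent = hits[0]
--     params = _EXTRACTORS.get(intent, lambda c, l: {})(command, cl)
--     if params is None:
--         return (None, {})
--     return (intent, params)
-- ===== Notes on version B (the rewrite author's own statement) =====
-- stated objective: alternative
-- what changed: Replaced the if/elif cascade of ad-hoc boolean tests with a declarative keyword grammar (per intent: an ALL-of list and an ANY-of list) evaluated exhaustively into a list of matching intents whose first element is taken, followed by a separate parameter-extraction stage keyed by intent; A interleaves matching and extraction lazily, B stages them.
import Mathlib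
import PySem

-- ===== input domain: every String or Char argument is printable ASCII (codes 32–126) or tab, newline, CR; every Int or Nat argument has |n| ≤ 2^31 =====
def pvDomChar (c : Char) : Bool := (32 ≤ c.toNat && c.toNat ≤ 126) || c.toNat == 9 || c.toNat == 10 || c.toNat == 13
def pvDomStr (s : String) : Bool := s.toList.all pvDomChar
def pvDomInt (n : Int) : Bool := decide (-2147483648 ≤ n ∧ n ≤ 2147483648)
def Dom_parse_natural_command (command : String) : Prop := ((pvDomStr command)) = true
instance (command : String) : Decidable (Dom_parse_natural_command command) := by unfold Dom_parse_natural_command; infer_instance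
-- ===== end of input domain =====

-- B replaces A's if/elif cascade with a declarative keyword grammar matched exhaustively
-- (all matching intents collected, first taken) plus a separate extraction stage; same value.

-- ===== PORT A =====

-- s.replace(old, "", 1): remove the FIRST occurrence of old (exact: PySem.Chars.find points
-- at the first occurrence; PySem has no count-limited replace, so this one step is by hand).
def pvRemoveFirst (s old : List Char) : List Char :=
  let i := PySem.Chars.find s old
  if i < 0 then s else s.take i.toNat ++ s.drop (i.toNat + old.length)

def parse_natural_command (command : String) : Option String × (List (String × String)) :=
  let cl := PySem.Str.lower command
  if PySem.Str.isIn "open" cl &&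
     (["website", "site", ".com", "http"].any (fun x => PySem.Str.isIn x cl)) then
    -- words = command.split(); url = next((w for w in words if '.com' in w or 'http' in w), None)
    let words := PySem.Str.split₀ command
    match words.find? (fun w => PySem.Str.isIn ".com" w || PySem.Str.isIn "http" w) with
    | some url => (some "open_website", [("url", url)])
    | none => (none, [])        -- falls through the whole if/elif chain to the final return
  else if PySem.Str.isIn "search" cl && PySem.Str.isIn "google" cl then
    let query :=
      if PySem.Str.isIn "for" cl then
        -- command_lower.split("for", 1)[1].strip(); the [1] exists since "for" in cl
        PySem.Str.strip (((PySem.Str.splitMax? cl "for" 1).getD []).getD 1 "")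
      else
        PySem.Str.strip (PySem.Str.replace (PySem.Str.replace cl "search" "") "google" "")
    (some "search_google", [("query", query)])
  else if PySem.Str.isIn "close browser" cl then
    (some "close_browser", [])
  else if PySem.Str.isIn "open" cl &&
          (["notepad", "calculator", "paint", "chrome", "edge"].any
            (fun x => PySem.Str.isIn x cl)) then
    -- next(...) is guaranteed to find one by the branch condition; None never reaches the dict
    let app := (["notepad", "calculator", "paint", "chrome", "edge"].find?
                  (fun x => PySem.Str.isIn x cl)).getD ""
    (some "open_app", [("app", app)])
  else if PySem.Str.isIn "close" cl then
    let words := PySem.Str.split₀ cl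
    let app := if words.isEmpty then "" else (PySem.List.pyGet? words (-1)).getD ""
    (some "close_app", [("app", app)])
  else if PySem.Str.isIn "what" cl && PySem.Str.isIn "running" cl then
    (some "list_apps", [])
  else if PySem.Str.isIn "type" cl then
    let text := PySem.Str.strip (String.ofList (pvRemoveFirst command.toList "type".toList))
    (some "type_text", [("text", text)])
  else if PySem.Str.isIn "screenshot" cl then
    (some "screenshot", [])
  else if PySem.Str.isIn "read screen" cl || PySem.Str.isIn "what's on screen" cl then
    (some "read_screen", [])
  else if PySem.Str.isIn "create file" cl then
    (some "create_file", [("filepath", "created_file.txt"), ("content", "Created by coco")])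
  else if PySem.Str.isIn "list files" cl then
    (some "list_files", [("folder", ".")])
  else
    (none, [])

-- ===== PORT B =====

def pvSiteWords : List String := ["website", "site", ".com", "http"]
def pvApps : List String := ["notepad", "calculator", "paint", "chrome", "edge"]

-- each rule: (intent, keywords that must ALL appear, keywords of which ANY must appear)
def pvRules : List (String × List String × List String) :=
  [ ("open_website", ["open"], pvSiteWords),
    ("search_google", ["search", "google"], []),
    ("close_browser", ["close browser"], []),
    ("open_app", ["open"], pvApps),
    ("close_app", ["close"], []),
    ("list_apps", ["what", "running"], []),
    ("type_text", ["type"], []),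
    ("screenshot", ["screenshot"], []),
    ("read_screen", [], ["read screen", "what's on screen"]),
    ("create_file", ["create file"], []),
    ("list_files", ["list files"], []) ]

-- _matches(cl, need_all, need_any)
def pvMatches (cl : String) (na ny : List String) : Bool :=
  (na.all (fun k => PySem.Str.isIn k cl)) &&
  (ny.isEmpty || ny.any (fun k => PySem.Str.isIn k cl))

-- _EXTRACTORS.get(intent, lambda: {}): dict of extractor functions, ported as lookup by intent;
-- returns none where the Python extractor returns None (url absent for open_website)
def pvExtract (intent command cl : String) : Option (List (String × String)) :=
  if intent == "open_website" then
    match (PySem.Str.split₀ command).find?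
            (fun w => PySem.Str.isIn ".com" w || PySem.Str.isIn "http" w) with
    | some url => some [("url", url)]
    | none => none
  else if intent == "search_google" then
    let query :=
      if PySem.Str.isIn "for" cl then
        PySem.Str.strip (((PySem.Str.splitMax? cl "for" 1).getD []).getD 1 "")
      else
        PySem.Str.strip (PySem.Str.replace (PySem.Str.replace cl "search" "") "google" "")
    some [("query", query)]
  else if intent == "open_app" then
    some [("app", (pvApps.find? (fun x => PySem.Str.isIn x cl)).getD "")]
  else if intent == "close_app" then
    let words := PySem.Str.split₀ cl
    some [("app", if words.isEmpty then "" else (PySem.List.pyGet? words (-1)).getD "")]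
  else if intent == "type_text" then
    some [("text", PySem.Str.strip (String.ofList (pvRemoveFirst command.toList "type".toList)))]
  else if intent == "create_file" then
    some [("filepath", "created_file.txt"), ("content", "Created by coco")]
  else if intent == "list_files" then
    some [("folder", ".")]
  else
    some []   -- dict .get default

def parse_natural_command_alt (command : String) : Option String × (List (String × String)) :=
  let cl := PySem.Str.lower command
  let hits := (pvRules.filter (fun r => pvMatches cl r.2.1 r.2.2)).map (fun r => r.1)
  match hits with
  | [] => (none, [])
  | intent :: _ =>
    match pvExtract intent command cl with
    | none => (none, [])
    | some params => (some intent, params)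

-- ===== PRECONDITION & SPEC =====
def Spec_parse_natural_command (command : String) (out : Option String × (List (String × String))) : Prop := out = parse_natural_command_alt command
instance (command : String) (out : Option String × (List (String × String))) : Decidable (Spec_parse_natural_command command out) := by unfold Spec_parse_natural_command; infer_instance

-- ===== CLAIM (what is proved, stated in full; the proofs are below) =====
def Claim_equal_parse_natural_command : Prop := ∀ (command : String), Dom_parse_natural_command command → Spec_parse_natural_command command (parse_natural_command command)

-- ===== LEMMAS AND PROOFS =====

-- first-match lookup (find?) = head of the list of all matches (filter)
theorem pv_find?_eq_head?_filter {α : Type} (l : List α) (q : α → Bool) :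
    l.find? q = (l.filter q).head? := by
  induction l with
  | nil => rfl
  | cons a t ih =>
    by_cases h : q a = true
    · rw [List.find?_cons_of_pos h, List.filter_cons, if_pos h, List.head?_cons]
    · rw [List.find?_cons_of_neg h, List.filter_cons, if_neg h, ih]

-- B restated through find? over the rule table
def pvAltFind (command : String) : Option String × (List (String × String)) :=
  let cl := PySem.Str.lower command
  match pvRules.find? (fun r => pvMatches cl r.2.1 r.2.2) with
  | none => (none, [])
  | some r =>
    match pvExtract r.1 command cl with
    | none => (none, [])
    | some params => (some r.1, params)

theorem pv_alt_eq_find (command : String) :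
    parse_natural_command_alt command = pvAltFind command := by
  simp only [parse_natural_command_alt, pvAltFind, pv_find?_eq_head?_filter]
  cases hf : List.filter (fun r => pvMatches (PySem.Str.lower command) r.2.1 r.2.2) pvRules <;>
    simp [hf]

-- the grammar matcher unfolded to A's literal boolean tests, rule by rule
theorem pvM1 (cl : String) : pvMatches cl ["open"] pvSiteWords
    = (PySem.Str.isIn "open" cl && (["website", "site", ".com", "http"].any (fun x => PySem.Str.isIn x cl))) := by
  simp [pvMatches, pvSiteWords]
theorem pvM2 (cl : String) : pvMatches cl ["search", "google"] []
    = (PySem.Str.isIn "search" cl && PySem.Str.isIn "google" cl) := by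
  simp [pvMatches]
theorem pvM3 (cl : String) : pvMatches cl ["close browser"] []
    = PySem.Str.isIn "close browser" cl := by
  simp [pvMatches]
theorem pvM4 (cl : String) : pvMatches cl ["open"] pvApps
    = (PySem.Str.isIn "open" cl && (["notepad", "calculator", "paint", "chrome", "edge"].any (fun x => PySem.Str.isIn x cl))) := by
  simp [pvMatches, pvApps]
theorem pvM5 (cl : String) : pvMatches cl ["close"] []
    = PySem.Str.isIn "close" cl := by
  simp [pvMatches]
theorem pvM6 (cl : String) : pvMatches cl ["what", "running"] []
    = (PySem.Str.isIn "what" cl && PySem.Str.isIn "running" cl) := by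
  simp [pvMatches]
theorem pvM7 (cl : String) : pvMatches cl ["type"] []
    = PySem.Str.isIn "type" cl := by
  simp [pvMatches]
theorem pvM8 (cl : String) : pvMatches cl ["screenshot"] []
    = PySem.Str.isIn "screenshot" cl := by
  simp [pvMatches]
theorem pvM9 (cl : String) : pvMatches cl [] ["read screen", "what's on screen"]
    = (PySem.Str.isIn "read screen" cl || PySem.Str.isIn "what's on screen" cl) := by
  simp [pvMatches]
theorem pvM10 (cl : String) : pvMatches cl ["create file"] []
    = PySem.Str.isIn "create file" cl := by
  simp [pvMatches]
theorem pvM11 (cl : String) : pvMatches cl ["list files"] []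
    = PySem.Str.isIn "list files" cl := by
  simp [pvMatches]

-- ===== VERDICT (by name: the statement is the Claim_ definition above) =====
theorem parse_natural_command_spec : Claim_equal_parse_natural_command := by
  intro command _
  show parse_natural_command command = parse_natural_command_alt command
  rw [pv_alt_eq_find]
  simp only [parse_natural_command, pvAltFind, pvRules, List.find?_cons,
    pvM1, pvM2, pvM3, pvM4, pvM5, pvM6, pvM7, pvM8, pvM9, pvM10, pvM11]
  generalize PySem.Str.lower command = cl
  by_cases h1 : (PySem.Str.isIn "open" cl && (["website", "site", ".com", "http"].any fun x => PySem.Str.isIn x cl)) = true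
  · simp only [h1, pvExtract]
    cases hw : List.find? (fun w => PySem.Str.isIn ".com" w || PySem.Str.isIn "http" w) (PySem.Str.split₀ command) <;> simp only [hw] <;> rfl
  rw [Bool.not_eq_true] at h1
  by_cases h2 : (PySem.Str.isIn "search" cl && PySem.Str.isIn "google" cl) = true
  · simp only [h1, h2, Bool.false_eq_true, if_true, if_false, String.reduceBEq, beq_self_eq_true, pvExtract, pvApps, pvSiteWords, List.find?_cons]
  rw [Bool.not_eq_true] at h2
  by_cases h3 : PySem.Str.isIn "close browser" cl = true
  · simp only [h1, h2, h3, Bool.false_eq_true, if_true, if_false, String.reduceBEq, beq_self_eq_true, pvExtract, pvApps, pvSiteWords, List.find?_cons]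
  rw [Bool.not_eq_true] at h3
  by_cases h4 : (PySem.Str.isIn "open" cl && (["notepad", "calculator", "paint", "chrome", "edge"].any fun x => PySem.Str.isIn x cl)) = true
  · simp only [h1, h2, h3, h4, Bool.false_eq_true, if_true, if_false, String.reduceBEq, beq_self_eq_true, pvExtract, pvApps, pvSiteWords, List.find?_cons]
  rw [Bool.not_eq_true] at h4
  by_cases h5 : PySem.Str.isIn "close" cl = true
  · simp only [h1, h2, h3, h4, h5, Bool.false_eq_true, if_true, if_false, String.reduceBEq, beq_self_eq_true, pvExtract, pvApps, pvSiteWords, List.find?_cons]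
  rw [Bool.not_eq_true] at h5
  by_cases h6 : (PySem.Str.isIn "what" cl && PySem.Str.isIn "running" cl) = true
  · simp only [h1, h2, h3, h4, h5, h6, Bool.false_eq_true, if_true, if_false, String.reduceBEq, beq_self_eq_true, pvExtract, pvApps, pvSiteWords, List.find?_cons]
  rw [Bool.not_eq_true] at h6
  by_cases h7 : PySem.Str.isIn "type" cl = true
  · simp only [h1, h2, h3, h4, h5, h6, h7, Bool.false_eq_true, if_true, if_false, String.reduceBEq, beq_self_eq_true, pvExtract, pvApps, pvSiteWords, List.find?_cons]
  rw [Bool.not_eq_true] at h7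
  by_cases h8 : PySem.Str.isIn "screenshot" cl = true
  · simp only [h1, h2, h3, h4, h5, h6, h7, h8, Bool.false_eq_true, if_true, if_false, String.reduceBEq, beq_self_eq_true, pvExtract, pvApps, pvSiteWords, List.find?_cons]
  rw [Bool.not_eq_true] at h8
  by_cases h9 : (PySem.Str.isIn "read screen" cl || PySem.Str.isIn "what's on screen" cl) = true
  · simp only [h1, h2, h3, h4, h5, h6, h7, h8, h9, Bool.false_eq_true, if_true, if_false, String.reduceBEq, beq_self_eq_true, pvExtract, pvApps, pvSiteWords, List.find?_cons]
  rw [Bool.not_eq_true] at h9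
  by_cases h10 : PySem.Str.isIn "create file" cl = true
  · simp only [h1, h2, h3, h4, h5, h6, h7, h8, h9, h10, Bool.false_eq_true, if_true, if_false, String.reduceBEq, beq_self_eq_true, pvExtract, pvApps, pvSiteWords, List.find?_cons]
  rw [Bool.not_eq_true] at h10
  by_cases h11 : PySem.Str.isIn "list files" cl = true
  · simp only [h1, h2, h3, h4, h5, h6, h7, h8, h9, h10, h11, Bool.false_eq_true, if_true, if_false, String.reduceBEq, beq_self_eq_true, pvExtract, pvApps, pvSiteWords, List.find?_cons]
  rw [Bool.not_eq_true] at h11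
  simp only [h1, h2, h3, h4, h5, h6, h7, h8, h9, h10, h11, Bool.false_eq_true, if_true, if_false, List.find?_nil]
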